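-- pv_equiv track=rewrite | github.com/yudy4431/SC-projects | babynames.py | search_names
-- ===== SOURCE A (Python) =====
-- def search_names(name_data, target):
--     """
--     Given a name_data dict that stores baby name information and a target string,
--     returns a list of all names in the dict that contain the target string. This
--     function should be case-insensitive with respect to the target string.
--
--     Input:
--         name_data (dict): a dict containing baby name data organized by name
--         target (str): a string to look for in the names contained within name_data
--
--     Returns:
--         matching_names (List[str]): a list of all names from name_data that contain
--                                     the target string
--
--     """
--     matching_names = []                             # A list to store names processed.
--     for name in name_data:
--         for i in range(len(name)-len(target)+1):    # Times to check. For example, Jerry <-> er, needs to check 4 times.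
--             check = ''                              # Store string processed to check
--             for j in range(len(target)):
--                 check += name[i+j]                  # Amounts of character to add in string 'check'
--             if check.lower() == target.lower():
--                 matching_names.append(name)         # Add names in list'matching_names'.
--
--     return matching_names
-- ===== SOURCE B (Python) =====
-- def search_names(name_data, target):
--     t = target.lower()
--     matching_names = []
--     for name in name_data:
--         n = name.lower()
--         i = n.find(t)
--         while i != -1:
--             matching_names.append(name)
--             i = n.find(t, i + 1)
--     return matching_names
-- ===== Notes on version B (the rewrite author's own statement) =====
-- stated objective: faster
-- what changed: lowercases the target and each name once and jumps from occurrence to occurrence with str.find(start) instead of rebuilding and re-lowercasing every length-|target| window character by character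
import Mathlib
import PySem

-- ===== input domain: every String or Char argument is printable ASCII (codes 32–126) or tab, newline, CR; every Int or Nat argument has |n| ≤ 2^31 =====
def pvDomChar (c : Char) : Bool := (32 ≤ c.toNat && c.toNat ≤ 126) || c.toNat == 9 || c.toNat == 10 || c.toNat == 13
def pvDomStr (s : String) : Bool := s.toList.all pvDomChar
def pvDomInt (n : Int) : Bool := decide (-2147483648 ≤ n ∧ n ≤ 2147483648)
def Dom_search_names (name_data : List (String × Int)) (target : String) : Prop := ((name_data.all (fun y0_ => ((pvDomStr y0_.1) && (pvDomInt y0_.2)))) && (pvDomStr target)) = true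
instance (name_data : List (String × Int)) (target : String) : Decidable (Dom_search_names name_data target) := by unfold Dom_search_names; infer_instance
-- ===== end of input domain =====

-- B lowercases each name once and walks str.find from occurrence to occurrence instead of
-- rebuilding and re-lowercasing every length-|target| window character by character (objective: faster).


-- ===== PORT A =====
-- 'for name in name_data' iterates the dict's keys, i.e. the first components in order.
-- name[i+j] is always in range (0 ≤ i, i+j ≤ len(name)-1), so pyGetD's default ' ' is never read.
def search_names (name_data : List (String × Int)) (target : String) : List String :=
  name_data.foldl (fun matching p =>
    (PySem.List.pyRange 0 ((p.1.toList.length : Int) - (target.toList.length : Int) + 1)).foldl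
      (fun matching i =>
        let check := (PySem.List.pyRange 0 ((target.toList.length : Int))).foldl
          (fun ch j => ch ++ [PySem.List.pyGetD p.1.toList (i + j) ' ']) ([] : List Char)
        if PySem.Chars.lower check = PySem.Chars.lower target.toList then matching ++ [p.1] else matching)
      matching) []

-- ===== PORT B =====
-- the 'while i != -1' loop of Source B; fuel n.length + 2 always suffices because the found
-- positions strictly increase and never exceed len(n) (proved in altLoop_spec below).
def altLoop (name : String) (n t : List Char) (i : Int) (acc : List String) : Nat → List String
  | 0 => acc
  | fuel+1 =>
      if i = -1 then acc
      else altLoop name n t (PySem.Chars.findFrom n t (i + 1)) (acc ++ [name]) fuel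

def search_names_alt (name_data : List (String × Int)) (target : String) : List String :=
  let t := PySem.Chars.lower target.toList
  name_data.foldl (fun acc p =>
    let n := PySem.Chars.lower p.1.toList
    altLoop p.1 n t (PySem.Chars.find n t) acc (n.length + 2)) []

-- ===== PRECONDITION & SPEC =====
def Spec_search_names (name_data : List (String × Int)) (target : String) (out : List String) : Prop := out = search_names_alt name_data target
instance (name_data : List (String × Int)) (target : String) (out : List String) : Decidable (Spec_search_names name_data target out) := by unfold Spec_search_names; infer_instance

-- ===== CLAIM (what is proved, stated in full; the proofs are below) =====
def Claim_equal_search_names : Prop := ∀ (name_data : List (String × Int)) (target : String), Dom_search_names name_data target → Spec_search_names name_data target (search_names name_data target)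

-- ===== LEMMAS AND PROOFS =====

-- number of occurrence positions of t in n at index ≥ s (overlapping; position n.length counts for t = [])
def occCnt (n t : List Char) (s : Nat) : Nat :=
  (List.range (n.length + 1 - s)).countP (fun d => decide (t <+: n.drop (s + d)))

lemma occCnt_step (n t : List Char) (s : Nat) (hs : s ≤ n.length) :
    occCnt n t s = (if t <+: n.drop s then 1 else 0) + occCnt n t (s + 1) := by
  unfold occCnt
  have h1 : n.length + 1 - s = (n.length - s) + 1 := by omega
  have h2 : n.length + 1 - (s + 1) = n.length - s := by omega
  rw [h1, h2, List.range_succ_eq_map, List.countP_cons, List.countP_map]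
  have h3 : List.countP ((fun d => decide (t <+: List.drop (s + d) n)) ∘ Nat.succ) (List.range (n.length - s))
      = List.countP (fun d => decide (t <+: List.drop (s + 1 + d) n)) (List.range (n.length - s)) := by
    apply List.countP_congr
    intro x _
    have : s + Nat.succ x = s + 1 + x := by omega
    simp [Function.comp, this]
  rw [h3]
  simp [Nat.add_comm]

lemma occCnt_eq_of_no_occ (n t : List Char) (s k : Nat) (hsk : s ≤ k) (hk : k ≤ n.length + 1)
    (h : ∀ i, s ≤ i → i < k → ¬ t <+: n.drop i) : occCnt n t s = occCnt n t k := by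
  induction k, hsk using Nat.le_induction with
  | base => rfl
  | succ k hsk ih =>
    have hk' : k ≤ n.length := by omega
    rw [ih (by omega) (fun i h1 h2 => h i h1 (by omega)), occCnt_step n t k hk',
        if_neg (h k hsk (by omega))]
    omega

lemma occCnt_top (n t : List Char) : occCnt n t (n.length + 1) = 0 := by
  unfold occCnt
  simp

lemma findFrom_past (s sub : List Char) (k : Int) (h0 : 0 ≤ k) (h : (s.length : Int) < k) :
    PySem.Chars.findFrom s sub k = -1 := by
  have h0' : ¬ k < 0 := by omega
  simp [PySem.Chars.findFrom, h0', h]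

lemma altLoop_spec (name : String) (n t : List Char) (fuel : Nat) :
    ∀ (s : Nat) (acc : List String), s ≤ n.length + 1 → n.length + 2 - s ≤ fuel →
    altLoop name n t (PySem.Chars.findFrom n t (s : Int)) acc fuel
      = acc ++ List.replicate (occCnt n t s) name := by
  induction fuel with
  | zero => intro s acc hs hf; exact absurd hf (by omega)
  | succ f ih =>
    intro s acc hs hf
    rcases Nat.lt_or_ge s (n.length + 1) with hlt | hge
    · have hsl : s ≤ n.length := by omega
      by_cases hF : PySem.Chars.findFrom n t (s : Int) = -1
      · rw [hF]
        have hno : ∀ i, s ≤ i → i < n.length + 1 → ¬ t <+: n.drop i := by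
          intro i h1 _ hp
          have hinf : t <:+: n.drop s := by
            have : n.drop i = (n.drop s).drop (i - s) := by
              rw [List.drop_drop]; congr 1; omega
            exact (this ▸ hp).isInfix.trans (List.drop_suffix (i - s) (n.drop s)).isInfix
          exact ((PySem.Chars.findFrom_natCast_eq_neg_one_iff n t s hsl).mp hF) hinf
        rw [occCnt_eq_of_no_occ n t s (n.length + 1) (by omega) le_rfl hno, occCnt_top]
        simp [altLoop]
      · obtain ⟨hge', hpre, hmin⟩ := PySem.Chars.findFrom_natCast_spec n t s hsl hF
        have hFnn : 0 ≤ PySem.Chars.findFrom n t (s : Int) := le_trans (by exact_mod_cast Nat.zero_le s) hge'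
        set k := (PySem.Chars.findFrom n t (s : Int)).toNat with hkdef
        have hFk : PySem.Chars.findFrom n t (s : Int) = (k : Int) := by omega
        have hsk : s ≤ k := by omega
        have hkle : k ≤ n.length := by
          by_contra h'
          have hd : n.drop k = [] := List.drop_eq_nil_of_le (by omega)
          have ht : t = [] := List.prefix_nil.mp (hd ▸ hpre)
          exact (hmin s le_rfl (by omega)) (ht ▸ List.nil_prefix)
        rw [hFk]
        have hne : ((k : Int)) ≠ -1 := by omega
        rw [altLoop, if_neg hne]
        have hc : (k : Int) + 1 = ((k + 1 : Nat) : Int) := by push_cast; ring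
        rw [hc, ih (k + 1) (acc ++ [name]) (by omega) (by omega)]
        have hcnt : occCnt n t s = occCnt n t (k + 1) + 1 := by
          rw [occCnt_eq_of_no_occ n t s k hsk (by omega) (fun i h1 h2 => hmin i h1 h2),
              occCnt_step n t k hkle, if_pos hpre]
          omega
        rw [hcnt]
        simp [List.replicate_succ, List.append_assoc]
    · have hs1 : s = n.length + 1 := by omega
      rw [hs1, findFrom_past n t _ (by exact_mod_cast Nat.zero_le _) (by push_cast; omega)]
      simp [altLoop, occCnt_top]

-- A's inner character-building loop produces exactly the window n[d : d+T]
lemma check_eq_window (n : List Char) (T d : Nat) (hd : d + T ≤ n.length) :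
    (PySem.List.pyRange 0 (T : Int)).foldl
        (fun ch j => ch ++ [PySem.List.pyGetD n ((d : Int) + j) ' ']) ([] : List Char)
      = (n.drop d).take T := by
  rw [PySem.List.foldl_append_singleton_eq_map, List.nil_append,
      PySem.List.pyRange_zero_natCast, List.map_map]
  apply List.ext_getElem
  · simp; omega
  · intro j hj1 hj2
    have hjT : j < T := by simpa using hj1
    have hin : d + j < n.length := by omega
    simp only [List.getElem_map, Function.comp, List.getElem_range]
    have hcast : (d : Int) + (j : Int) = ((d + j : Nat) : Int) := by push_cast; ring
    rw [hcast, PySem.List.pyGetD_natCast, List.getD_eq_getElem n ' ' hin,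
        List.getElem_take, List.getElem_drop]

-- A's per-name window scan counts exactly the occurrence positions of lower t in lower n
lemma a_count (n t : List Char) :
    (PySem.List.pyRange 0 ((n.length : Int) - (t.length : Int) + 1)).countP
        (fun i => decide (PySem.Chars.lower
            ((PySem.List.pyRange 0 ((t.length : Int))).foldl
              (fun ch j => ch ++ [PySem.List.pyGetD n (i + j) ' ']) ([] : List Char))
          = PySem.Chars.lower t))
      = occCnt (PySem.Chars.lower n) (PySem.Chars.lower t) 0 := by
  rcases Nat.lt_or_ge t.length (n.length + 1) with hT | hT
  · have hM : (n.length : Int) - (t.length : Int) + 1 = ((n.length - t.length + 1 : Nat) : Int) := by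
      push_cast; omega
    rw [hM, PySem.List.pyRange_zero_natCast (n.length - t.length + 1), List.countP_map]
    have hstep : List.countP
        ((fun i => decide (PySem.Chars.lower
            ((PySem.List.pyRange 0 ((t.length : Int))).foldl
              (fun ch j => ch ++ [PySem.List.pyGetD n (i + j) ' ']) ([] : List Char))
          = PySem.Chars.lower t)) ∘ (fun k : Nat => (k : Int)))
          (List.range (n.length - t.length + 1))
        = List.countP (fun d => decide (PySem.Chars.lower t <+: (PySem.Chars.lower n).drop d))
          (List.range (n.length - t.length + 1)) := by
      apply List.countP_congr
      intro d hd
      have hdlt : d + t.length ≤ n.length := by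
        have := List.mem_range.mp hd; omega
      simp only [Function.comp, decide_eq_true_eq]
      rw [check_eq_window n t.length d hdlt]
      unfold PySem.Chars.lower
      rw [List.map_take, List.map_drop]
      constructor
      · intro h
        rw [List.prefix_iff_eq_take, List.length_map]
        exact h.symm
      · intro h
        rw [List.prefix_iff_eq_take, List.length_map] at h
        exact h.symm
    rw [hstep]
    unfold occCnt
    simp only [Nat.zero_add, Nat.sub_zero]
    have hln : (PySem.Chars.lower n).length = n.length := by unfold PySem.Chars.lower; simp
    rw [hln]
    have hsplit : n.length + 1 = (n.length - t.length + 1) + t.length := by omega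
    rw [hsplit, List.range_add (n := n.length - t.length + 1) (m := t.length), List.countP_append, List.countP_map]
    have h2 : List.countP ((fun d => decide (PySem.Chars.lower t <+: List.drop d (PySem.Chars.lower n)))
        ∘ fun x => n.length - t.length + 1 + x) (List.range t.length) = 0 := by
      rw [List.countP_eq_zero]
      intro x hx hp
      simp only [Function.comp, decide_eq_true_eq] at hp
      have hlen := hp.length_le
      have hl1 : (PySem.Chars.lower t).length = t.length := by unfold PySem.Chars.lower; simp
      have hl2 : (PySem.Chars.lower n).length = n.length := by unfold PySem.Chars.lower; simp
      simp only [List.length_drop, hl1, hl2] at hlen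
      have := List.mem_range.mp hx
      omega
    rw [h2]
    omega
  · have hempty : PySem.List.pyRange 0 ((n.length : Int) - (t.length : Int) + 1) = [] := by
      rw [List.eq_nil_iff_forall_not_mem]
      intro x hx
      have := PySem.List.mem_pyRange_one.mp hx
      omega
    rw [hempty]
    unfold occCnt
    simp only [List.countP_nil]
    rw [eq_comm, List.countP_eq_zero]
    intro d _ hp
    have hlen := (of_decide_eq_true hp).length_le
    simp only [List.length_drop] at hlen
    have h1 : (PySem.Chars.lower t).length = t.length := by unfold PySem.Chars.lower; simp
    have h2 : (PySem.Chars.lower n).length = n.length := by unfold PySem.Chars.lower; simp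
    rw [h1, h2] at hlen
    omega

lemma per_name (name : String) (t : List Char) (acc : List String) :
    (PySem.List.pyRange 0 ((name.toList.length : Int) - (t.length : Int) + 1)).foldl
      (fun matching i =>
        let check := (PySem.List.pyRange 0 ((t.length : Int))).foldl
          (fun ch j => ch ++ [PySem.List.pyGetD name.toList (i + j) ' ']) ([] : List Char)
        if PySem.Chars.lower check = PySem.Chars.lower t then matching ++ [name] else matching)
      acc
    = altLoop name (PySem.Chars.lower name.toList) (PySem.Chars.lower t)
        (PySem.Chars.find (PySem.Chars.lower name.toList) (PySem.Chars.lower t)) acc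
        ((PySem.Chars.lower name.toList).length + 2) := by
  show (PySem.List.pyRange 0 ((name.toList.length : Int) - (t.length : Int) + 1)).foldl
      (fun matching i =>
        if PySem.Chars.lower
            ((PySem.List.pyRange 0 ((t.length : Int))).foldl
              (fun ch j => ch ++ [PySem.List.pyGetD name.toList (i + j) ' ']) ([] : List Char))
          = PySem.Chars.lower t then matching ++ [name] else matching)
      acc = _
  rw [PySem.List.foldl_append_ite
      (p := fun i => PySem.Chars.lower
            ((PySem.List.pyRange 0 ((t.length : Int))).foldl
              (fun ch j => ch ++ [PySem.List.pyGetD name.toList (i + j) ' ']) ([] : List Char))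
          = PySem.Chars.lower t)
      (f := fun _ => name)]
  rw [List.map_const', ← List.countP_eq_length_filter, a_count name.toList t]
  have h0 : PySem.Chars.find (PySem.Chars.lower name.toList) (PySem.Chars.lower t)
      = PySem.Chars.findFrom (PySem.Chars.lower name.toList) (PySem.Chars.lower t) ((0 : Nat) : Int) := by
    rw [Nat.cast_zero, PySem.Chars.findFrom_zero]
  rw [h0, altLoop_spec name (PySem.Chars.lower name.toList) (PySem.Chars.lower t)
      ((PySem.Chars.lower name.toList).length + 2) 0 acc (by omega) (by omega)]

-- ===== VERDICT (by name: the statement is the Claim_ definition above) =====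
theorem search_names_spec : Claim_equal_search_names := by
  intro name_data target _
  unfold Spec_search_names search_names search_names_alt
  show name_data.foldl _ [] =
    name_data.foldl (fun (acc : List String) (p : String × Int) =>
      altLoop p.1 (PySem.Chars.lower p.1.toList) (PySem.Chars.lower target.toList)
        (PySem.Chars.find (PySem.Chars.lower p.1.toList) (PySem.Chars.lower target.toList)) acc
        ((PySem.Chars.lower p.1.toList).length + 2)) []
  exact PySem.List.foldl_congr_mem (l := name_data) (init := ([] : List String))
    (h := fun (acc : List String) (p : String × Int) _ => per_name p.1 target.toList acc)
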